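-- pv_equiv track=rewrite | github.com/rwinkhart/sshyp | bin/sshync.py | time_sort
-- ===== SOURCE A (Python) =====
-- def time_sort(old_names, new_names, old_times):
--     remote_mod_times_new = []
--     new_pos = -1
--     for title in new_names:
--         new_pos += 1
--         if title in old_names:
--             old_pos = old_names.index(title)
--             remote_mod_times_new.append(old_times[old_pos])
--     return remote_mod_times_new
-- ===== SOURCE B (Python) =====
-- def time_sort(old_names, new_names, old_times):
--     # Inverted "scatter" pass: index the queries of new_names by position, then
--     # stream the old (name, time) pairs once, writing each name's time into the
--     # slots of all queries for that name (pop => first occurrence wins), and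
--     # finally drop the slots no old pair filled.
--     slots = {}
--     for pos, name in enumerate(new_names):
--         slots.setdefault(name, []).append(pos)
--     out = [None] * len(new_names)
--     for name, t in zip(old_names, old_times):
--         for pos in slots.pop(name, ()):
--             out[pos] = t
--     return [t for t in out if t is not None]
-- ===== Notes on version B (the rewrite author's own statement) =====
-- stated objective: faster
-- what changed: Inverted the direction of matching: instead of looking each new title up in old_names (membership + .index scan per title), B indexes new_names by position (name -> list of query slots), streams the zipped old (name, time) pairs once, scatters each time into its name's output slots (pop makes the first old occurrence win), and compacts the unfilled slots.
-- outside the precondition, e.g. on time_sort(['a'], ['a'], []): A raises IndexError, B returns []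
import Mathlib
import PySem

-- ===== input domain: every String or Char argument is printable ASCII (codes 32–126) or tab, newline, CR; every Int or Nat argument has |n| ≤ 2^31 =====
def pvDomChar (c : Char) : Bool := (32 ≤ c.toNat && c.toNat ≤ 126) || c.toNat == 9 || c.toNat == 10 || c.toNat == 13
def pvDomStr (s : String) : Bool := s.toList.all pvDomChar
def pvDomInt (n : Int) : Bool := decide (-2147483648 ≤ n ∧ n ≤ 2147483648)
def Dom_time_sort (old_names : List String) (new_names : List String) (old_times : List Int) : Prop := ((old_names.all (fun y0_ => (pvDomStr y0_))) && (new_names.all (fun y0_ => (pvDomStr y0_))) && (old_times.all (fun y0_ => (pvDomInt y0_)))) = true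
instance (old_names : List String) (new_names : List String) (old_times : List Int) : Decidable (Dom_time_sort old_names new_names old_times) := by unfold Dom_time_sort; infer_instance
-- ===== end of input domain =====

-- B inverts the matching direction: it indexes new_names by position (name → its query slots),
-- streams the zipped old (name, time) pairs once scattering each time into its name's slots
-- (first occurrence wins), then compacts the unfilled slots (objective: faster).

-- ===== PORT A =====
-- Literal transliteration of A: loop over new_names with a (result, new_pos) state,
-- membership test, .index, then old_times[old_pos].  `pyGetD … 0` is old_times[old_pos]:
-- its out-of-range default case is exactly where Python raises IndexError, excluded by Pre_.
def time_sort (old_names : List String) (new_names : List String) (old_times : List Int) : List Int :=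
  (new_names.foldl (fun (st : List Int × Int) title =>
    let st := (st.1, st.2 + 1)          -- new_pos += 1
    if title ∈ old_names then
      match PySem.List.index? old_names title with
      | some old_pos => (st.1 ++ [PySem.List.pyGetD old_times (old_pos : Int) 0], st.2)
      | none => st
    else st) ([], -1)).1

-- ===== PORT B =====
-- slots.setdefault(name, []).append(pos) over enumerate(new_names); then
-- for name, t in zip(old_names, old_times): for pos in slots.pop(name, ()): out[pos] = t;
-- then the compacting comprehension.  slots.pop = get? + erase.
def time_sort_alt (old_names : List String) (new_names : List String) (old_times : List Int) : List Int :=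
  let slots := (new_names.foldl
      (fun (st : PySem.Dict String (List Nat) × Nat) name =>
        (st.1.insert name (st.1.getD name [] ++ [st.2]), st.2 + 1))
      (PySem.Dict.empty, 0)).1
  let final := (old_names.zip old_times).foldl
      (fun (st : List (Option Int) × PySem.Dict String (List Nat)) p =>
        match st.2.get? p.1 with
        | some ps => (ps.foldl (fun out pos => out.set pos (some p.2)) st.1, st.2.erase p.1)
        | none => st)
      (List.replicate new_names.length none, slots)
  final.1.filterMap id

-- ===== PRECONDITION & SPEC =====
-- Pre_ excludes exactly the inputs where A raises IndexError: some title of new_names is found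
-- in old_names at a first index ≥ len(old_times).
def Pre_time_sort (old_names : List String) (new_names : List String) (old_times : List Int) : Prop :=
  ∀ t ∈ new_names, t ∈ old_names → old_names.idxOf t < old_times.length
instance (old_names : List String) (new_names : List String) (old_times : List Int) : Decidable (Pre_time_sort old_names new_names old_times) := by unfold Pre_time_sort; infer_instance

def pvWitness_time_sort : List String × List String × List Int := (["a", "b"], ["b", "c", "a"], [3, 7])

def Spec_time_sort (old_names : List String) (new_names : List String) (old_times : List Int) (out : List Int) : Prop := out = time_sort_alt old_names new_names old_times
instance (old_names : List String) (new_names : List String) (old_times : List Int) (out : List Int) : Decidable (Spec_time_sort old_names new_names old_times out) := by unfold Spec_time_sort; infer_instance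

-- ===== CLAIM (what is proved, stated in full; the proofs are below) =====
def Claim_equal_time_sort : Prop := ∀ (old_names : List String) (new_names : List String) (old_times : List Int), Dom_time_sort old_names new_names old_times → Pre_time_sort old_names new_names old_times → Spec_time_sort old_names new_names old_times (time_sort old_names new_names old_times)

-- ===== LEMMAS AND PROOFS =====

-- get? after erase (PySem.Dict is a plain association list)
theorem find?_filter_ne (l : List (String × List Nat)) (k k' : String) (hne : k' ≠ k) :
    (l.filter (fun p => !(p.1 == k))).find? (fun p => p.1 == k') =
      l.find? (fun p => p.1 == k') := by
  induction l with
  | nil => rfl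
  | cons p l ih =>
    have h3 : ¬ k = k' := fun he => hne he.symm
    by_cases h2 : p.1 = k'
    · have h1 : ¬ p.1 = k := fun he => hne (h2.symm.trans he)
      simp [List.filter_cons, List.find?_cons, h1, h2, hne]
    · by_cases h1 : p.1 = k <;>
        simp [List.filter_cons, List.find?_cons, h1, h2, h3, hne, ih]

theorem find?_filter_self (l : List (String × List Nat)) (k : String) :
    (l.filter (fun p => !(p.1 == k))).find? (fun p => p.1 == k) = none := by
  rw [List.find?_eq_none]
  intro x hx
  simp only [List.mem_filter, Bool.not_eq_eq_eq_not, Bool.not_true, beq_eq_false_iff_ne] at hx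
  simp [hx.2]

theorem get?_erase (d : PySem.Dict String (List Nat)) (k k' : String) :
    (d.erase k).get? k' = if k' = k then none else d.get? k' := by
  rcases d with ⟨l⟩
  simp only [PySem.Dict.erase, PySem.Dict.get?]
  by_cases h : k' = k
  · subst h
    rw [find?_filter_self]
    simp
  · rw [find?_filter_ne l k k' h, if_neg h]

-- positions of n in `new` counting from i0 (the contents of B's slots lists)
def posFrom : List String → Nat → String → List Nat
  | [], _, _ => []
  | a :: tl, i0, n => (if a = n then [i0] else []) ++ posFrom tl (i0 + 1) n

theorem mem_posFrom (new : List String) (i0 : Nat) (n : String) (i : Nat) :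
    i ∈ posFrom new i0 n ↔ i0 ≤ i ∧ new[i - i0]? = some n := by
  induction new generalizing i0 with
  | nil => simp [posFrom]
  | cons a tl ih =>
    simp only [posFrom, List.mem_append]
    rw [ih (i0 + 1)]
    constructor
    · rintro (h | ⟨h1, h2⟩)
      · have : i = i0 ∧ a = n := by
          by_cases ha : a = n <;> simp [ha] at h <;> simp [h, ha]
        obtain ⟨rfl, rfl⟩ := this
        simp
      · have hi : i - i0 = (i - (i0 + 1)) + 1 := by omega
        refine ⟨by omega, ?_⟩
        rw [hi, List.getElem?_cons_succ]
        exact h2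
    · rintro ⟨h1, h2⟩
      by_cases he : i = i0
      · subst he
        left
        simp at h2
        simp [h2]
      · right
        have hi : i - i0 = (i - (i0 + 1)) + 1 := by omega
        rw [hi, List.getElem?_cons_succ] at h2
        exact ⟨by omega, h2⟩

-- B's first loop builds exactly the position lists
theorem build_get? (new : List String) (i0 : Nat) (d : PySem.Dict String (List Nat)) (n : String) :
    ((new.foldl (fun (st : PySem.Dict String (List Nat) × Nat) name =>
        (st.1.insert name (st.1.getD name [] ++ [st.2]), st.2 + 1)) (d, i0)).1).get? n =
      match d.get? n with
      | some qs => some (qs ++ posFrom new i0 n)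
      | none => if posFrom new i0 n = [] then none else some (posFrom new i0 n) := by
  induction new generalizing i0 d with
  | nil =>
    rcases h : d.get? n with _ | qs <;> simp [posFrom, h]
  | cons a tl ih =>
    simp only [List.foldl_cons]
    rw [ih]
    by_cases han : n = a
    · subst han
      rw [PySem.Dict.get?_insert_self]
      rw [PySem.Dict.getD_eq_get?_getD]
      rcases h : d.get? n with _ | qs <;> simp [h, posFrom]
    · rw [PySem.Dict.get?_insert, if_neg han]
      have hna : ¬ a = n := fun h => han h.symm
      have : posFrom (a :: tl) i0 n = posFrom tl (i0 + 1) n := by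
        simp [posFrom, hna]
      rw [this]

-- scattering t into the slots ps: length and pointwise effect
theorem setMany_length (ps : List Nat) (t : Int) (out : List (Option Int)) :
    (ps.foldl (fun o p => o.set p (some t)) out).length = out.length := by
  induction ps generalizing out with
  | nil => rfl
  | cons p ps ih => simp [ih]

theorem setMany_getElem? (ps : List Nat) (t : Int) (out : List (Option Int)) (i : Nat) :
    (ps.foldl (fun o p => o.set p (some t)) out)[i]? =
      if i ∈ ps ∧ i < out.length then some (some t) else out[i]? := by
  induction ps generalizing out with
  | nil => simp
  | cons p ps ih =>
    have hset : (out.set p (some t))[i]? =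
        if i = p ∧ i < out.length then some (some t) else out[i]? := by
      rw [List.getElem?_set]
      by_cases hip : p = i
      · subst hip
        by_cases hlt : p < out.length
        · simp [hlt]
        · have hnone : out[p]? = none :=
            List.getElem?_eq_none_iff.mpr (by omega)
          simp [hlt, hnone]
      · have h2 : ¬ i = p := fun h => hip h.symm
        simp [hip, h2]
    rw [List.foldl_cons, ih, List.length_set, hset]
    by_cases hip : i = p
    · subst hip
      by_cases hlt : i < out.length
      · by_cases hm : i ∈ ps <;> simp [hm, hlt, List.mem_cons]
      · simp [hlt, List.mem_cons]
    · by_cases hm : i ∈ ps <;> by_cases hlt : i < out.length <;>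
        simp [hip, hm, hlt, List.mem_cons]

-- the scatter loop, pointwise: slot i (whose only pending key is k) ends as the
-- time of the first pair of l named k, or keeps its current content
theorem scatter_getElem? (l : List (String × Int)) (out : List (Option Int))
    (d : PySem.Dict String (List Nat)) (i : Nat) (k : String)
    (hk : ∀ n ps, d.get? n = some ps → i ∈ ps → n = k) :
    (l.foldl (fun (st : List (Option Int) × PySem.Dict String (List Nat)) p =>
        match st.2.get? p.1 with
        | some ps => (ps.foldl (fun out pos => out.set pos (some p.2)) st.1, st.2.erase p.1)
        | none => st) (out, d)).1[i]? =
      match d.get? k with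
      | some ps =>
          if i ∈ ps ∧ i < out.length then
            match l.find? (fun p => p.1 == k) with
            | some p => some (some p.2)
            | none => out[i]?
          else out[i]?
      | none => out[i]? := by
  induction l generalizing out d with
  | nil => rcases h : d.get? k with _ | ps <;> simp [h]
  | cons p l ih =>
    simp only [List.foldl_cons]
    rcases hn : d.get? p.1 with _ | qs
    · -- pair skipped
      rw [ih out d hk]
      rcases h : d.get? k with _ | ps
      · simp [h]
      · have hb : (p.1 == k) = false := by
          have hne : p.1 ≠ k := fun he => by rw [he, h] at hn; cases hn
          simp [hne]
        simp [h, List.find?_cons, hb]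
    · -- pair scatters into slots qs, key erased
      simp only [hn]
      have hk' : ∀ n ps, ((d.erase p.1).get? n) = some ps → i ∈ ps → n = k := by
        intro n ps hps him
        rw [get?_erase] at hps
        split_ifs at hps
        exact hk n ps hps him
      rw [ih _ _ hk']
      by_cases hpk : p.1 = k
      · subst hpk
        rw [get?_erase, if_pos rfl, hn]
        rw [setMany_getElem?]
        simp only [List.find?_cons, beq_self_eq_true, cond_true]
      · have hiq : i ∉ qs := fun him => hpk (hk _ _ hn him)
        have hout : (qs.foldl (fun o pos => o.set pos (some p.2)) out)[i]? = out[i]? := by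
          rw [setMany_getElem?]; simp [hiq]
        rw [get?_erase, if_neg (fun h => hpk h.symm)]
        rcases h : d.get? k with _ | ps
        · simp [h, hout]
        · have hb : (p.1 == k) = false := by simp [hpk]
          simp only [h, setMany_length, List.find?_cons, hb, cond_false, hout]

-- length of the scatter loop's output list
theorem scatter_length (l : List (String × Int)) (out : List (Option Int))
    (d : PySem.Dict String (List Nat)) :
    (l.foldl (fun (st : List (Option Int) × PySem.Dict String (List Nat)) p =>
        match st.2.get? p.1 with
        | some ps => (ps.foldl (fun out pos => out.set pos (some p.2)) st.1, st.2.erase p.1)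
        | none => st) (out, d)).1.length = out.length := by
  induction l generalizing out d with
  | nil => rfl
  | cons p l ih =>
    simp only [List.foldl_cons]
    rcases hn : d.get? p.1 with _ | qs
    · simp [hn, ih]
    · simp [hn, ih, setMany_length]

-- reducing B's per-slot match to Option.map
theorem match_find (o : Option (String × Int)) :
    (match o with
      | some p => some (some p.2)
      | none => some (none : Option Int)) = some (o.map Prod.snd) := by
  cases o <;> rfl

-- B's whole body, characterised per title of new_names
theorem alt_eq_filterMap (old_names : List String) (new_names : List String) (old_times : List Int) :
    time_sort_alt old_names new_names old_times =
      new_names.filterMap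
        (fun t => ((old_names.zip old_times).find? (fun p => p.1 == t)).map Prod.snd) := by
  simp only [time_sort_alt]
  have hfinal :
      ((old_names.zip old_times).foldl
        (fun (st : List (Option Int) × PySem.Dict String (List Nat)) p =>
          match st.2.get? p.1 with
          | some ps => (ps.foldl (fun out pos => out.set pos (some p.2)) st.1, st.2.erase p.1)
          | none => st)
        (List.replicate new_names.length none,
          (new_names.foldl (fun (st : PySem.Dict String (List Nat) × Nat) name =>
            (st.1.insert name (st.1.getD name [] ++ [st.2]), st.2 + 1)) (PySem.Dict.empty, 0)).1)).1 =
      new_names.map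
        (fun t => ((old_names.zip old_times).find? (fun p => p.1 == t)).map Prod.snd) := by
    apply List.ext_getElem?
    intro i
    have hslots : ∀ n, ((new_names.foldl (fun (st : PySem.Dict String (List Nat) × Nat) name =>
        (st.1.insert name (st.1.getD name [] ++ [st.2]), st.2 + 1)) (PySem.Dict.empty, 0)).1).get? n =
        if posFrom new_names 0 n = [] then none else some (posFrom new_names 0 n) := by
      intro n
      rw [build_get?]
      simp [PySem.Dict.get?_empty]
    by_cases hi : i < new_names.length
    · have hnew : new_names[i - 0]? = some new_names[i] := by
        simpa using List.getElem?_eq_getElem hi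
      have hk : ∀ n ps, ((new_names.foldl (fun (st : PySem.Dict String (List Nat) × Nat) name =>
          (st.1.insert name (st.1.getD name [] ++ [st.2]), st.2 + 1)) (PySem.Dict.empty, 0)).1).get? n = some ps → i ∈ ps → n = new_names[i] := by
        intro n ps hps him
        by_cases hc : posFrom new_names 0 n = []
        · rw [hslots, if_pos hc] at hps; cases hps
        · rw [hslots, if_neg hc] at hps
          injection hps with e
          subst e
          obtain ⟨-, h2⟩ := (mem_posFrom new_names 0 n i).mp him
          rw [hnew] at h2
          injection h2 with h2
          exact h2.symm
      rw [scatter_getElem? _ _ _ i new_names[i] hk]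
      rw [hslots]
      have hmem : i ∈ posFrom new_names 0 new_names[i] := by
        rw [mem_posFrom]
        exact ⟨Nat.zero_le i, hnew⟩
      have hne : posFrom new_names 0 new_names[i] ≠ [] := fun h => by simp [h] at hmem
      rw [if_neg hne]
      simp only [hmem, List.length_replicate, hi, and_self, if_true]
      rw [List.getElem?_map, List.getElem?_eq_getElem hi]
      have hrep : (List.replicate new_names.length (none : Option Int))[i]? = some none := by
        simp [List.getElem?_replicate, hi]
      rw [hrep, match_find]
      rfl
    · have h1 : (new_names.map (fun t => ((old_names.zip old_times).find? (fun p => p.1 == t)).map Prod.snd))[i]? = none := by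
        rw [List.getElem?_eq_none_iff]; simpa using Nat.le_of_not_lt hi
      rw [h1, List.getElem?_eq_none_iff]
      rw [scatter_length]
      simpa using Nat.le_of_not_lt hi
  rw [hfinal]
  rw [List.filterMap_map]
  rfl

-- find? over the zip is old_times[idxOf t]? when t occurs, none otherwise
theorem find?_zip (old_names : List String) (old_times : List Int) (t : String) :
    ((old_names.zip old_times).find? (fun p => p.1 == t)).map Prod.snd =
      if t ∈ old_names then old_times[old_names.idxOf t]? else none := by
  induction old_names generalizing old_times with
  | nil => simp
  | cons a old ih =>
    cases old_times with
    | nil =>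
      by_cases h : t ∈ a :: old <;> simp [h]
    | cons c times =>
      by_cases hat : a = t
      · subst hat
        simp [List.idxOf_cons_self]
      · have hb : (a == t) = false := by simp [hat]
        have hmem : (t ∈ a :: old) ↔ t ∈ old := by
          constructor
          · intro h; cases h with | head => exact absurd rfl hat | tail _ hh => exact hh
          · exact List.mem_cons_of_mem a
        rw [List.zip_cons_cons, List.find?_cons]
        simp only [hb, ih times]
        by_cases hm : t ∈ old
        · simp [hmem, hm, List.idxOf_cons, hb]
        · simp [hmem, hm]

theorem index?_of_mem (l : List String) (t : String) (h : t ∈ l) :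
    PySem.List.index? l t = some (l.idxOf t) := by
  rw [PySem.List.index?_eq_idxOf?]
  induction l with
  | nil => cases h
  | cons a l ih =>
    by_cases hat : a = t
    · subst hat; simp [List.idxOf?_cons, List.idxOf_cons_self]
    · have h' : t ∈ l := by cases h with | head => exact absurd rfl hat | tail _ hh => exact hh
      have hb : (a == t) = false := by simp [hat]
      simp [List.idxOf?_cons, hb, List.idxOf_cons, ih h']

-- A's loop produces exactly the per-title lookups, appended to the accumulator
theorem foldlA_eq (old_names : List String) (old_times : List Int)
    (new_names : List String) (acc : List Int) (n : Int)
    (hpre : ∀ t ∈ new_names, t ∈ old_names → old_names.idxOf t < old_times.length) :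
    (new_names.foldl (fun (st : List Int × Int) title =>
        let st := (st.1, st.2 + 1)
        if title ∈ old_names then
          match PySem.List.index? old_names title with
          | some old_pos => (st.1 ++ [PySem.List.pyGetD old_times (old_pos : Int) 0], st.2)
          | none => st
        else st) (acc, n)).1 =
      acc ++ new_names.filterMap
        (fun t => if t ∈ old_names then old_times[old_names.idxOf t]? else none) := by
  induction new_names generalizing acc n with
  | nil => simp
  | cons t new ih =>
    simp only [List.foldl_cons, List.filterMap_cons]
    by_cases ht : t ∈ old_names
    · have hlt := hpre t (List.mem_cons_self ..) ht
      simp only [if_pos ht, index?_of_mem old_names t ht]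
      rw [ih _ _ (fun s hs => hpre s (List.mem_cons_of_mem _ hs))]
      have hget : PySem.List.pyGetD old_times ((old_names.idxOf t : Nat) : Int) 0 =
          old_times[old_names.idxOf t] := by
        rw [PySem.List.pyGetD_natCast, List.getD_eq_getElem _ _ hlt]
      rw [hget, List.getElem?_eq_getElem hlt]
      simp
    · simp only [if_neg ht]
      rw [ih _ _ (fun s hs => hpre s (List.mem_cons_of_mem _ hs))]

-- ===== VERDICT (by name: the statements are the Claim_ definitions above) =====
theorem time_sort_spec : Claim_equal_time_sort := by
  intro old_names new_names old_times _ hpre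
  unfold Spec_time_sort time_sort
  rw [foldlA_eq old_names old_times new_names [] (-1) hpre]
  rw [alt_eq_filterMap]
  simp only [List.nil_append]
  apply List.filterMap_congr
  intro t _
  rw [find?_zip]
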